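-- pv_equiv track=rewrite | github.com/suar2/meraki_dashboard | backend/app/services/switchport_client_builder.py | infer_trunk_host_label
-- ===== SOURCE A (Python) =====
-- from typing import Any, Callable
--
-- def infer_trunk_host_label(clients: list[dict[str, Any]]) -> str:
--     for c in clients:
--         d = str(c.get("description") or c.get("dhcpHostname") or "").lower()
--         if "proxmox" in d:
--             return "Proxmox / Server"
--         if "esxi" in d or "vmware" in d:
--             return "ESXi / Server"
--     for c in clients:
--         d = str(c.get("description") or c.get("dhcpHostname") or "").strip()
--         if d and d.lower() not in {"unknown", "none"} and len(d) < 64: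
--             return f"{d} (trunk)"
--     return "Server / Trunk host"
-- ===== SOURCE B (Python) =====
-- def infer_trunk_host_label(clients: list) -> str:
--     candidate = None
--     for c in clients:
--         raw = str(c.get("description") or c.get("dhcpHostname") or "")
--         low = raw.lower()
--         if "proxmox" in low:
--             return "Proxmox / Server"
--         if "esxi" in low or "vmware" in low:
--             return "ESXi / Server"
--         if candidate is None:
--             d = raw.strip()
--             if d and d.lower() not in ("unknown", "none") and len(d) < 64:
--                 candidate = d
--     return f"{candidate} (trunk)" if candidate is not None else "Server / Trunk host"
-- ===== Notes on version B (the rewrite author's own statement) =====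
-- stated objective: simpler
-- what changed: Replaced A's two full passes over the client list by a single pass that returns immediately on a hypervisor match and remembers the first valid description as a candidate for the post-loop label.
import Mathlib
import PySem

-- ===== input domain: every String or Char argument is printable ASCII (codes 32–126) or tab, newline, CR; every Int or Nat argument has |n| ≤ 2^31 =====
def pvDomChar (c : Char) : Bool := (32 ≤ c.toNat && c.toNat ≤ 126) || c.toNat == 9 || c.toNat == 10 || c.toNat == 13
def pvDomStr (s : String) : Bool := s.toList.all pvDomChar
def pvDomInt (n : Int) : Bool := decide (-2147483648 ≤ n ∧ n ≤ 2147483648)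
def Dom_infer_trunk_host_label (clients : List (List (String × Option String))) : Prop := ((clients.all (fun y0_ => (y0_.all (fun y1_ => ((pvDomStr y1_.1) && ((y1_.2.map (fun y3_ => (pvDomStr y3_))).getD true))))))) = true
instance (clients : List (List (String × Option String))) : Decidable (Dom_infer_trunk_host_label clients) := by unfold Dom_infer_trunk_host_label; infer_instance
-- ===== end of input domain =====

-- B is a single pass that returns early on a hypervisor match and remembers the first
-- valid description; A makes two full passes. Equivalence of the return value is proved.

-- dict.get(k) on the association list (first match); values are Option String (None possible)
def pvGet (c : List (String × Option String)) (k : String) : Option (Option String) :=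
  match c with
  | [] => none
  | (k', v) :: rest => if k' == k then some v else pvGet rest k

-- str(c.get("description") or c.get("dhcpHostname") or ""): first truthy value, else ""
def pvTruthy (v : Option (Option String)) : Option String :=
  match v with
  | some (some s) => if s = "" then none else some s
  | _ => none

def pvRawDesc (c : List (String × Option String)) : String :=
  match pvTruthy (pvGet c "description") with
  | some s => s
  | none =>
    match pvTruthy (pvGet c "dhcpHostname") with
    | some s => s
    | none => ""

-- the condition of A's second loop / B's candidate update: d and d.lower() not in {...} and len(d) < 64
def pvValid (d : String) : Bool :=
  (!(d = "")) && (!(PySem.Str.lower d = "unknown" || PySem.Str.lower d = "none")) && (PySem.Str.len d < 64)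

-- ===== PORT A =====
def pvALoop1 (clients : List (List (String × Option String))) : Option String :=
  match clients with
  | [] => none
  | c :: rest =>
    let d := PySem.Str.lower (pvRawDesc c)
    if PySem.Str.isIn "proxmox" d then some "Proxmox / Server"
    else if PySem.Str.isIn "esxi" d || PySem.Str.isIn "vmware" d then some "ESXi / Server"
    else pvALoop1 rest

def pvALoop2 (clients : List (List (String × Option String))) : String :=
  match clients with
  | [] => "Server / Trunk host"
  | c :: rest =>
    let d := PySem.Str.strip (pvRawDesc c)
    if pvValid d then d ++ " (trunk)" else pvALoop2 rest

def infer_trunk_host_label (clients : List (List (String × Option String))) : String :=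
  match pvALoop1 clients with
  | some r => r
  | none => pvALoop2 clients

-- ===== PORT B =====
def pvBLoop (clients : List (List (String × Option String))) (candidate : Option String) : String :=
  match clients with
  | [] =>
    match candidate with
    | some d => d ++ " (trunk)"
    | none => "Server / Trunk host"
  | c :: rest =>
    let raw := pvRawDesc c
    let low := PySem.Str.lower raw
    if PySem.Str.isIn "proxmox" low then "Proxmox / Server"
    else if PySem.Str.isIn "esxi" low || PySem.Str.isIn "vmware" low then "ESXi / Server"
    else
      match candidate with
      | some _ => pvBLoop rest candidate
      | none =>
        let d := PySem.Str.strip raw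
        pvBLoop rest (if pvValid d then some d else none)

def infer_trunk_host_label_alt (clients : List (List (String × Option String))) : String :=
  pvBLoop clients none

-- ===== PRECONDITION & SPEC =====
def Spec_infer_trunk_host_label (clients : List (List (String × Option String))) (out : String) : Prop := out = infer_trunk_host_label_alt clients
instance (clients : List (List (String × Option String))) (out : String) : Decidable (Spec_infer_trunk_host_label clients out) := by unfold Spec_infer_trunk_host_label; infer_instance

-- ===== CLAIM (what is proved, stated in full; the proofs are below) =====
def Claim_equal_infer_trunk_host_label : Prop := ∀ (clients : List (List (String × Option String))), Dom_infer_trunk_host_label clients → Spec_infer_trunk_host_label clients (infer_trunk_host_label clients)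

-- ===== LEMMAS AND PROOFS =====

-- if some client matches a hypervisor, B's single pass returns A's first-loop answer
theorem pvBLoop_of_loop1_some (clients : List (List (String × Option String))) (r : String)
    (h : pvALoop1 clients = some r) (cand : Option String) : pvBLoop clients cand = r := by
  induction clients generalizing cand with
  | nil => simp [pvALoop1] at h
  | cons c rest ih =>
    rw [pvALoop1] at h
    rw [pvBLoop.eq_def]
    by_cases h1 : PySem.Chars.isIn ['p','r','o','x','m','o','x'] (PySem.Chars.lower (pvRawDesc c).toList) = true
    · simp [h1] at h ⊢; exact h
    · by_cases h2 : PySem.Chars.isIn ['e','s','x','i'] (PySem.Chars.lower (pvRawDesc c).toList) = true ∨ PySem.Chars.isIn ['v','m','w','a','r','e'] (PySem.Chars.lower (pvRawDesc c).toList) = true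
      · simp [h1, h2] at h ⊢; exact h
      · simp [h1, h2] at h ⊢
        cases cand with
        | some d => exact ih h _
        | none => exact ih h _

-- if no client matches a hypervisor, B's pass returns the pending candidate or A's second loop
theorem pvBLoop_of_loop1_none (clients : List (List (String × Option String)))
    (h : pvALoop1 clients = none) (cand : Option String) :
    pvBLoop clients cand = (match cand with | some d => d ++ " (trunk)" | none => pvALoop2 clients) := by
  induction clients generalizing cand with
  | nil => cases cand <;> rfl
  | cons c rest ih =>
    rw [pvALoop1] at h
    rw [pvBLoop.eq_def]
    by_cases h1 : PySem.Chars.isIn ['p','r','o','x','m','o','x'] (PySem.Chars.lower (pvRawDesc c).toList) = true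
    · simp [h1] at h
    · by_cases h2 : PySem.Chars.isIn ['e','s','x','i'] (PySem.Chars.lower (pvRawDesc c).toList) = true ∨ PySem.Chars.isIn ['v','m','w','a','r','e'] (PySem.Chars.lower (pvRawDesc c).toList) = true
      · simp [h1, h2] at h
      · simp [h1, h2] at h ⊢
        cases cand with
        | some d => simpa using ih h (some d)
        | none =>
          rw [pvALoop2]
          by_cases hv : pvValid (PySem.Str.strip (pvRawDesc c)) = true
          · simp [hv]; simpa using ih h (some (PySem.Str.strip (pvRawDesc c)))
          · simp [hv]; simpa using ih h none

-- ===== VERDICT (by name: the statement is the Claim_ definition above) =====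
theorem infer_trunk_host_label_spec : Claim_equal_infer_trunk_host_label := by
  intro clients _
  unfold Spec_infer_trunk_host_label infer_trunk_host_label infer_trunk_host_label_alt
  cases h : pvALoop1 clients with
  | some r => rw [pvBLoop_of_loop1_some clients r h none]
  | none => rw [pvBLoop_of_loop1_none clients h none]
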